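-- pv_equiv track=rewrite | github.com/dasha2000vas/python_gym | for_loop/homework/sum_of_series.py | sum_of_series
-- ===== SOURCE A (Python) =====
-- def sum_of_series(n: int) -> int:
--     """
--     Calculates sum of series made up n times.
--
--     Args:
--         n (int): Count of times.
--
--     Returns:
--         result (int): Sum of series.
--     """
--     if not isinstance(n, int):
--         raise ValueError("n must be integer")
--     if n <= 0:
--         raise ValueError("n must be positive")
--     result = 0
--     for i in range(1, n + 1):
--         term = 1
--         for j in range(i, 2 * i + 1):
--              term *= j
--         result += term
--     return result
-- ===== SOURCE B (Python) =====
-- def sum_of_series(n: int) -> int: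
--     """O(n) rewrite: update term(i)=i*(i+1)*...*(2i) incrementally via the exact
--     ratio term(i+1) = term(i)*(2i+1)*(2i+2)//i instead of recomputing each product."""
--     if not isinstance(n, int):
--         raise ValueError("n must be integer")
--     if n <= 0:
--         raise ValueError("n must be positive")
--     total = 0
--     term = 2  # term for i = 1: 1*2
--     for i in range(1, n + 1):
--         total += term
--         term = term * (2 * i + 1) * (2 * i + 2) // i
--     return total
-- ===== Notes on version B (the rewrite author's own statement) =====
-- stated objective: faster
-- what changed: Replaces the inner product loop (recomputing i*(i+1)*...*2i from scratch each iteration) with a single pass that updates the term via the exact ratio term(i+1)=term(i)*(2i+1)*(2i+2)//i.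
import Mathlib
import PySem

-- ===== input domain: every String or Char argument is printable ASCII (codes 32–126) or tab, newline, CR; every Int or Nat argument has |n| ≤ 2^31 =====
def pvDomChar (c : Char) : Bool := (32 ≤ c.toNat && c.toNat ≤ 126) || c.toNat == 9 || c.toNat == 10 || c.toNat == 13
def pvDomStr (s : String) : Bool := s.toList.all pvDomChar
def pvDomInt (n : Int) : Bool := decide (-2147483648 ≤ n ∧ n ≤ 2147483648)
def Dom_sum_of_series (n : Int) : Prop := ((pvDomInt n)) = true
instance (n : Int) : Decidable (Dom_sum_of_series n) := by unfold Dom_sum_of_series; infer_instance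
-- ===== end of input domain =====

-- B replaces A's O(n^2) nested product loop with one O(n) pass updating the term by its exact ratio.

-- ===== PORT A =====
-- A's inner loop: term = product of j over range(i, 2*i+1)
def sum_of_series (n : Int) : Int :=
  (PySem.List.pyRange 1 (n + 1) 1).foldl
    (fun result i =>
      result + (PySem.List.pyRange i (2 * i + 1) 1).foldl (fun term j => term * j) 1)
    0

-- ===== PORT B =====
-- B's loop state is (total, term); term starts at 2 (= term for i = 1)
def sum_of_series_alt (n : Int) : Int :=
  ((PySem.List.pyRange 1 (n + 1) 1).foldl
    (fun (s : Int × Int) i =>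
      (s.1 + s.2, PySem.Int.floordiv (s.2 * (2 * i + 1) * (2 * i + 2)) i))
    (0, 2)).1

-- ===== PRECONDITION & SPEC =====
-- A raises ValueError on non-positive n; exactly those inputs are excluded.
def Pre_sum_of_series (n : Int) : Prop := 1 ≤ n
instance (n : Int) : Decidable (Pre_sum_of_series n) := by unfold Pre_sum_of_series; infer_instance
def pvWitness_sum_of_series : Int := (3)

def Spec_sum_of_series (n : Int) (out : Int) : Prop := out = sum_of_series_alt n
instance (n : Int) (out : Int) : Decidable (Spec_sum_of_series n out) := by unfold Spec_sum_of_series; infer_instance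

-- ===== CLAIM (what is proved, stated in full; the proofs are below) =====
def Claim_equal_sum_of_series : Prop := ∀ (n : Int), Dom_sum_of_series n → Pre_sum_of_series n → Spec_sum_of_series n (sum_of_series n)

-- ===== LEMMAS AND PROOFS =====

-- the term A's inner loop computes for a given i
def pvTerm (i : Int) : Int :=
  (PySem.List.pyRange i (2 * i + 1) 1).foldl (fun term j => term * j) 1

lemma pvTerm_eq_prod (i : Int) : pvTerm i = (PySem.List.pyRange i (2 * i + 1) 1).prod := by
  simp [pvTerm, List.prod_eq_foldl]

-- ratio identity: i * term(i+1) = term(i) * (2i+1) * (2i+2)  (for 1 ≤ i)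
lemma pvTerm_ratio (i : Int) (hi : 1 ≤ i) :
    i * pvTerm (i + 1) = pvTerm i * (2 * i + 1) * (2 * i + 2) := by
  rw [pvTerm_eq_prod, pvTerm_eq_prod]
  have h1 : PySem.List.pyRange i (2 * i + 3) 1
      = PySem.List.pyRange i (2 * i + 1) 1 ++ PySem.List.pyRange (2 * i + 1) (2 * i + 3) 1 :=
    PySem.List.pyRange_one_append i (2 * i + 1) (2 * i + 3) (by omega) (by omega)
  have h2 : PySem.List.pyRange i (2 * i + 3) 1
      = i :: PySem.List.pyRange (i + 1) (2 * i + 3) 1 :=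
    PySem.List.pyRange_one_cons (by omega)
  have h3 : PySem.List.pyRange (2 * i + 1) (2 * i + 3) 1 = [2 * i + 1, 2 * i + 2] := by
    rw [PySem.List.pyRange_one_cons (by omega)]
    have : (2 * i + 1) + 1 = 2 * i + 2 := by ring
    rw [this, PySem.List.pyRange_one_cons (by omega), PySem.List.pyRange_one_eq_nil (by omega)]
  have e1 : i * (PySem.List.pyRange (i + 1) (2 * i + 3) 1).prod
      = (PySem.List.pyRange i (2 * i + 1) 1).prod * ((2 * i + 1) * (2 * i + 2)) := by
    calc i * (PySem.List.pyRange (i + 1) (2 * i + 3) 1).prod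
        = (PySem.List.pyRange i (2 * i + 3) 1).prod := by rw [h2]; simp [List.prod_cons]
      _ = (PySem.List.pyRange i (2 * i + 1) 1).prod * ((2 * i + 1) * (2 * i + 2)) := by
          rw [h1]; simp [List.prod_append, h3]
  have harg : 2 * (i + 1) + 1 = 2 * i + 3 := by ring
  rw [harg]
  linarith [e1]

-- the division in B's step is exact (for 1 ≤ i)
lemma pvStep_term (i : Int) (hi : 1 ≤ i) :
    PySem.Int.floordiv (pvTerm i * (2 * i + 1) * (2 * i + 2)) i = pvTerm (i + 1) := by
  rw [← pvTerm_ratio i hi, PySem.Int.floordiv_eq_ediv_of_pos (by omega)]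
  rw [Int.mul_ediv_cancel_left _ (by omega : i ≠ 0)]

-- loop invariant: after folding over range(1, k+2) the state is (A's sum, term(k+2))
lemma pvLoop_invariant (k : Nat) :
    (PySem.List.pyRange 1 ((k : Int) + 1 + 1) 1).foldl
      (fun (s : Int × Int) i =>
        (s.1 + s.2, PySem.Int.floordiv (s.2 * (2 * i + 1) * (2 * i + 2)) i)) (0, 2)
    = ((PySem.List.pyRange 1 ((k : Int) + 1 + 1) 1).foldl (fun result i => result + pvTerm i) 0,
       pvTerm ((k : Int) + 1 + 1)) := by
  induction k with
  | zero =>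
      rw [PySem.List.pyRange_one_cons (by omega), PySem.List.pyRange_one_eq_nil (by omega)]
      simp [List.foldl]
      constructor
      · decide
      · decide
  | succ m ih =>
      have hsplit : PySem.List.pyRange 1 ((m + 1 : Nat) + 1 + 1 : Int) 1
          = PySem.List.pyRange 1 ((m : Int) + 1 + 1) 1 ++ [(m : Int) + 1 + 1] := by
        have h : ((m + 1 : Nat) : Int) + 1 + 1 = ((m : Int) + 1 + 1) + 1 := by push_cast; ring
        rw [h, PySem.List.pyRange_one_succ_right (by omega)]
      rw [hsplit, List.foldl_append, List.foldl_append, ih]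
      simp only [List.foldl]
      rw [pvStep_term ((m : Int) + 1 + 1) (by omega)]
      have harg : ((m + 1 : Nat) : Int) + 1 + 1 = (m : Int) + 1 + 1 + 1 := by push_cast; ring
      rw [harg]

-- A's result equals the fold of pvTerm over the same range
lemma pvA_eq (n : Int) :
    sum_of_series n
      = (PySem.List.pyRange 1 (n + 1) 1).foldl (fun result i => result + pvTerm i) 0 := by
  rfl

-- ===== VERDICT (by name: the statement is the Claim_ definition above) =====
theorem sum_of_series_spec : Claim_equal_sum_of_series := by
  intro n _ hpre
  have hn : 1 ≤ n := hpre
  unfold Spec_sum_of_series sum_of_series_alt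
  obtain ⟨k, hk⟩ : ∃ k : Nat, n = (k : Int) + 1 :=
    ⟨(n - 1).toNat, by omega⟩
  subst hk
  rw [pvLoop_invariant k, ← pvA_eq]
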